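-- pv_equiv track=rewrite | github.com/EnesBrt/Dojo | my_katas/sous_ensemble_le_plus_proche.py | find_closer_subs
-- ===== SOURCE A (Python) =====
-- target = 31
--
-- def find_closer_subs(arr, k, t):
--
--     sums_array = []
--     for n in range(len(arr) - k + 1):
--         sums = 0
--         for x in range(n, n + k):
--             sums = arr[x] + sums
--         sums_array.append(sums)
--
--     closest_element = None
--     min_diff = float('inf')
--
--     for element in sums_array:
--         diff = abs(element - target)
--         if diff < min_diff:
--             closest_element = element
--             min_diff = diff
--
--     return closest_element
-- ===== SOURCE B (Python) =====
-- target = 31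
--
-- def find_closer_subs(arr, k, t):
--     n = len(arr)
--     if k < 0 or k > n:
--         return None
--     s = sum(arr[:k])
--     best, best_diff = s, abs(s - target)
--     for i in range(k, n):
--         s += arr[i] - arr[i - k]
--         d = abs(s - target)
--         if d < best_diff:
--             best, best_diff = s, d
--     return best
-- ===== Notes on version B (the rewrite author's own statement) =====
-- stated objective: faster
-- what changed: B replaces A's recomputation of each length-k window sum from scratch (nested loops) with a single sliding-window pass that updates a running sum and tracks the first sum whose distance to the module constant 31 is minimal (A ignores its t parameter, comparing against the global target=31; B reproduces that).
-- intended difference: On k < 0 A returns 0, the sum of its empty index ranges (an artefact of the empty inner loop), while B returns None, the intended answer since no window of negative length exists. — e.g. on find_closer_subs([1, 2], -1, 5): A returns some 0, B returns none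
import Mathlib
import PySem

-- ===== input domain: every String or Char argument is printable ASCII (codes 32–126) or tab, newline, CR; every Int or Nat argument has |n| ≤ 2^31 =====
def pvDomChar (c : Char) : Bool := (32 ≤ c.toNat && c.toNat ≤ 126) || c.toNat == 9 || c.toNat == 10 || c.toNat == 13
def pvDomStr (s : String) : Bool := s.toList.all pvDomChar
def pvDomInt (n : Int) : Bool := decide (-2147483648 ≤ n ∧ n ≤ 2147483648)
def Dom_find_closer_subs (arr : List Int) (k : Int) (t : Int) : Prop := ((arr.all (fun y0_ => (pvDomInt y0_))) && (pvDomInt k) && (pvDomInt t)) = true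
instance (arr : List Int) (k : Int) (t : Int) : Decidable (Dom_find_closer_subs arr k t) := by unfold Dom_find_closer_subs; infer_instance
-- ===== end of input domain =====

-- B replaces A's per-window re-summation by one sliding-window pass with a running sum (faster).
-- Both programs ignore t and compare against the module constant target = 31, as A's source does.

-- ===== PORT A =====
-- arr[x] is always in range when the loops run (0 ≤ n ≤ len-k and n ≤ x < n+k), so pyGetD is exact here.
def find_closer_subs (arr : List Int) (k : Int) (t : Int) : Option Int :=
  let sums_array := (PySem.List.pyRange 0 ((arr.length : Int) - k + 1) 1).map (fun n =>
    (PySem.List.pyRange n (n + k) 1).foldl (fun sums x => PySem.List.pyGetD arr x 0 + sums) 0)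
  (sums_array.foldl (fun (st : Option Int × Option Int) element =>
      let diff := |element - 31|
      match st.2 with
      | none => (some element, some diff)
      | some m => if diff < m then (some element, some diff) else st)
    (none, none)).1

-- ===== PORT B =====
-- arr[i] and arr[i-k] are always in range (k ≤ i < len, 0 ≤ i-k), so pyGetD is exact here.
def find_closer_subs_alt (arr : List Int) (k : Int) (t : Int) : Option Int :=
  let n : Int := arr.length
  if k < 0 ∨ n < k then none
  else
    let s0 := (PySem.List.slice arr none (some k)).sum
    let st := (PySem.List.pyRange k n 1).foldl
      (fun (st : Int × Int × Int) i =>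
        let s := st.1 + PySem.List.pyGetD arr i 0 - PySem.List.pyGetD arr (i - k) 0
        let d := |s - 31|
        if d < st.2.2 then (s, s, d) else (s, st.2.1, st.2.2))
      (s0, s0, |s0 - 31|)
    some st.2.1

-- ===== PRECONDITION & SPEC =====
-- On k < 0 A returns 0 — the sum of its empty index ranges, an artefact of the empty inner
-- loop — while B returns None, the intended answer since no window of negative length exists.
def D_find_closer_subs (arr : List Int) (k : Int) (t : Int) : Prop := k < 0
instance (arr : List Int) (k : Int) (t : Int) : Decidable (D_find_closer_subs arr k t) := by unfold D_find_closer_subs; infer_instance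

def Spec_find_closer_subs (arr : List Int) (k : Int) (t : Int) (out : Option Int) : Prop := ¬ D_find_closer_subs arr k t → out = find_closer_subs_alt arr k t
instance (arr : List Int) (k : Int) (t : Int) (out : Option Int) : Decidable (Spec_find_closer_subs arr k t out) := by unfold Spec_find_closer_subs; infer_instance

def pvDiffWitness_find_closer_subs : List Int × Int × Int := ([1, 2], -1, 5)
def pvDiffWitnessOut_find_closer_subs : (Option Int) × (Option Int) := (some 0, none)

-- ===== CLAIM (what is proved, stated in full; the proofs are below) =====
def Claim_unchanged_find_closer_subs : Prop := ∀ (arr : List Int) (k : Int) (t : Int), Dom_find_closer_subs arr k t → Spec_find_closer_subs arr k t (find_closer_subs arr k t)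
def Claim_changed_find_closer_subs : Prop := Dom_find_closer_subs (pvDiffWitness_find_closer_subs.1) (pvDiffWitness_find_closer_subs.2.1) (pvDiffWitness_find_closer_subs.2.2) ∧ D_find_closer_subs (pvDiffWitness_find_closer_subs.1) (pvDiffWitness_find_closer_subs.2.1) (pvDiffWitness_find_closer_subs.2.2) ∧ find_closer_subs (pvDiffWitness_find_closer_subs.1) (pvDiffWitness_find_closer_subs.2.1) (pvDiffWitness_find_closer_subs.2.2) = pvDiffWitnessOut_find_closer_subs.1 ∧ find_closer_subs_alt (pvDiffWitness_find_closer_subs.1) (pvDiffWitness_find_closer_subs.2.1) (pvDiffWitness_find_closer_subs.2.2) = pvDiffWitnessOut_find_closer_subs.2 ∧ pvDiffWitnessOut_find_closer_subs.1 ≠ pvDiffWitnessOut_find_closer_subs.2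
def Claim_exact_find_closer_subs : Prop := ∀ (arr : List Int) (k : Int) (t : Int), Dom_find_closer_subs arr k t → D_find_closer_subs arr k t → find_closer_subs arr k t ≠ find_closer_subs_alt arr k t

-- ===== LEMMAS AND PROOFS =====

-- window sum of arr over indices [i, i+k)
def pvW (arr : List Int) (i k : Int) : Int :=
  ((PySem.List.pyRange i (i + k) 1).map (fun x => PySem.List.pyGetD arr x 0)).sum

-- the shared selection step: keep the first sum with strictly smaller |· - 31|
def pvSel (bd : Int × Int) (w : Int) : Int × Int :=
  if |w - 31| < bd.2 then (w, |w - 31|) else bd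

-- the loop bodies of the two ports, as named functions (definitionally equal to the inline lambdas)
def pvAstep (st : Option Int × Option Int) (element : Int) : Option Int × Option Int :=
  let diff := |element - 31|
  match st.2 with
  | none => (some element, some diff)
  | some m => if diff < m then (some element, some diff) else st

def pvBstep (arr : List Int) (k : Int) (st : Int × Int × Int) (i : Int) : Int × Int × Int :=
  let s := st.1 + PySem.List.pyGetD arr i 0 - PySem.List.pyGetD arr (i - k) 0
  let d := |s - 31|
  if d < st.2.2 then (s, s, d) else (s, st.2.1, st.2.2)

theorem pv_foldl_addl (g : Int → Int) (l : List Int) (a : Int) :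
    l.foldl (fun s x => g x + s) a = a + (l.map g).sum := by
  induction l generalizing a with
  | nil => simp
  | cons x xs ih => simp [List.foldl, ih]; ring

theorem pvW_succ (arr : List Int) (m k : Int) (hk : 0 ≤ k) :
    pvW arr (m + 1) k
      = pvW arr m k + PySem.List.pyGetD arr (m + k) 0 - PySem.List.pyGetD arr m 0 := by
  by_cases h0 : k = 0
  · subst h0
    unfold pvW
    rw [PySem.List.pyRange_one_eq_nil (by omega : m + 1 + 0 ≤ m + 1),
        PySem.List.pyRange_one_eq_nil (by omega : m + 0 ≤ m),
        show m + 0 = m by ring]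
    simp
  · unfold pvW
    rw [show m + 1 + k = (m + k) + 1 by ring,
        PySem.List.pyRange_one_succ_right (by omega : m + 1 ≤ m + k),
        PySem.List.pyRange_one_cons (by omega : m < m + k)]
    simp; ring

theorem pvA_fold (l : List Int) (b d : Int) :
    l.foldl pvAstep (some b, some d)
    = (some (l.foldl pvSel (b, d)).1, some (l.foldl pvSel (b, d)).2) := by
  induction l generalizing b d with
  | nil => rfl
  | cons x xs ih =>
    rw [List.foldl_cons, List.foldl_cons,
        show pvAstep (some b, some d) x
          = if |x - 31| < d then (some x, some |x - 31|) else (some b, some d) from rfl,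
        show pvSel (b, d) x = if |x - 31| < d then (x, |x - 31|) else (b, d) from rfl]
    by_cases h : |x - 31| < d
    · rw [if_pos h, if_pos h, ih]
    · rw [if_neg h, if_neg h, ih]

theorem pvB_fold (arr : List Int) (k : Int) (hk : 0 ≤ k) (n : Int) :
    ∀ (fuel : Nat) (j b d : Int), (n - j).toNat ≤ fuel →
    ((PySem.List.pyRange j n 1).foldl (pvBstep arr k) (pvW arr (j - k) k, b, d)).2
      = ((PySem.List.pyRange (j - k + 1) (n - k + 1) 1).map (fun i => pvW arr i k)).foldl pvSel (b, d) := by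
  intro fuel
  induction fuel with
  | zero =>
    intro j b d hf
    rw [PySem.List.pyRange_one_eq_nil (by omega : n ≤ j),
        PySem.List.pyRange_one_eq_nil (by omega : n - k + 1 ≤ j - k + 1)]
    rfl
  | succ m ih =>
    intro j b d hf
    by_cases hj : n ≤ j
    · rw [PySem.List.pyRange_one_eq_nil hj,
          PySem.List.pyRange_one_eq_nil (by omega : n - k + 1 ≤ j - k + 1)]
      rfl
    · have hjn : j < n := by omega
      have hs : pvW arr (j - k) k + PySem.List.pyGetD arr j 0 - PySem.List.pyGetD arr (j - k) 0
          = pvW arr (j - k + 1) k := by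
        rw [pvW_succ arr (j - k) k hk, show j - k + k = j by ring]
      rw [PySem.List.pyRange_one_cons hjn,
          PySem.List.pyRange_one_cons (by omega : j - k + 1 < n - k + 1),
          List.map_cons, List.foldl_cons, List.foldl_cons,
          show pvBstep arr k (pvW arr (j - k) k, b, d) j
            = (let s := pvW arr (j - k) k + PySem.List.pyGetD arr j 0 - PySem.List.pyGetD arr (j - k) 0;
               if |s - 31| < d then (s, s, |s - 31|) else (s, b, d)) from rfl]
      simp only [hs]
      rw [show pvSel (b, d) (pvW arr (j - k + 1) k)
            = if |pvW arr (j - k + 1) k - 31| < d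
              then (pvW arr (j - k + 1) k, |pvW arr (j - k + 1) k - 31|) else (b, d) from rfl]
      have e1 : pvW arr (j - k + 1) k = pvW arr (j + 1 - k) k := by
        rw [show j - k + 1 = j + 1 - k by ring]
      by_cases h : |pvW arr (j - k + 1) k - 31| < d
      · rw [if_pos h, if_pos h, e1,
            show j - k + 1 + 1 = j + 1 - k + 1 by ring, ih (j + 1) _ _ (by omega)]
      · rw [if_neg h, if_neg h, e1,
            show j - k + 1 + 1 = j + 1 - k + 1 by ring, ih (j + 1) _ _ (by omega)]

theorem pv_s0_eq (arr : List Int) (k : Int) (hkn : 0 ≤ k ∧ k ≤ (arr.length : Int)) :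
    (PySem.List.slice arr none (some k)).sum = pvW arr 0 k := by
  have h2 := PySem.List.map_pyGetD_pyRange_zero' (xs := arr) (d := (0 : Int))
  rw [PySem.List.pyRange_one_append 0 k (arr.length) (by omega) hkn.2, List.map_append] at h2
  rw [PySem.List.slice_to arr (by omega : (0:Int) ≤ k)]
  conv_lhs => rw [← h2]
  rw [List.take_append_of_le_length
        (by simp [PySem.List.length_pyRange_one] : k.toNat ≤ ((PySem.List.pyRange 0 k 1).map (fun j => PySem.List.pyGetD arr j 0)).length),
      List.take_of_length_le
        (by simp [PySem.List.length_pyRange_one] : ((PySem.List.pyRange 0 k 1).map (fun j => PySem.List.pyGetD arr j 0)).length ≤ k.toNat)]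
  unfold pvW
  rw [show (0:Int) + k = k by ring]

theorem pv_zero_fold (r : List Int) :
    (r.map (fun _ => (0 : Int))).foldl pvAstep (some 0, some 31) = (some 0, some 31) := by
  induction r with
  | nil => rfl
  | cons x xs ih =>
    rw [List.map_cons, List.foldl_cons,
        show pvAstep (some 0, some 31) 0 = if |(0:Int) - 31| < 31 then (some 0, some 31) else (some 0, some 31) from rfl,
        if_neg (by norm_num), ih]

-- ===== VERDICT (by name: the statement is the Claim_ definition above) =====
theorem find_closer_subs_spec : Claim_unchanged_find_closer_subs := by
  intro arr k t _
  unfold Spec_find_closer_subs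
  intro hnd
  have hk : 0 ≤ k := by
    unfold D_find_closer_subs at hnd; omega
  have hAdef : find_closer_subs arr k t
      = (((PySem.List.pyRange 0 ((arr.length : Int) - k + 1) 1).map (fun n =>
            (PySem.List.pyRange n (n + k) 1).foldl (fun sums x => PySem.List.pyGetD arr x 0 + sums) 0)).foldl
          pvAstep (none, none)).1 := rfl
  have hBdef : find_closer_subs_alt arr k t
      = if k < 0 ∨ (arr.length : Int) < k then none
        else some (((PySem.List.pyRange k (arr.length : Int) 1).foldl (pvBstep arr k)
          ((PySem.List.slice arr none (some k)).sum, (PySem.List.slice arr none (some k)).sum,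
            |(PySem.List.slice arr none (some k)).sum - 31|)).2.1) := rfl
  rw [hAdef, hBdef]
  by_cases hbig : (arr.length : Int) < k
  · rw [PySem.List.pyRange_one_eq_nil (by omega : (arr.length : Int) - k + 1 ≤ 0),
        if_pos (Or.inr hbig)]
    rfl
  · rw [if_neg (by omega)]
    have hmap : (fun n => (PySem.List.pyRange n (n + k) 1).foldl
        (fun sums x => PySem.List.pyGetD arr x 0 + sums) 0) = fun i => pvW arr i k := by
      funext i
      rw [pv_foldl_addl]; simp [pvW]
    rw [hmap, pv_s0_eq arr k ⟨by omega, by omega⟩,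
        PySem.List.pyRange_one_cons (by omega : (0:Int) < (arr.length : Int) - k + 1),
        List.map_cons, List.foldl_cons,
        show pvAstep (none, none) (pvW arr 0 k) = (some (pvW arr 0 k), some |pvW arr 0 k - 31|) from rfl,
        pvA_fold]
    have hB := pvB_fold arr k hk (arr.length : Int) ((arr.length : Int) - k).toNat k
      (pvW arr 0 k) (|pvW arr 0 k - 31|) (by omega)
    rw [show k - k = (0:Int) by ring, show (0:Int) + 1 = 1 from rfl] at hB
    rw [show (0:Int) + 1 = 1 from rfl, hB]

theorem find_closer_subs_changed : Claim_changed_find_closer_subs := by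
  unfold Claim_changed_find_closer_subs; decide

theorem find_closer_subs_tight : Claim_exact_find_closer_subs := by
  intro arr k t _ hD
  unfold D_find_closer_subs at hD
  have hAdef : find_closer_subs arr k t
      = (((PySem.List.pyRange 0 ((arr.length : Int) - k + 1) 1).map (fun n =>
            (PySem.List.pyRange n (n + k) 1).foldl (fun sums x => PySem.List.pyGetD arr x 0 + sums) 0)).foldl
          pvAstep (none, none)).1 := rfl
  have hBnone : find_closer_subs_alt arr k t = none := by
    show (if k < 0 ∨ (arr.length : Int) < k then none else _) = none
    rw [if_pos (Or.inl hD)]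
  have hmap0 : (fun n => (PySem.List.pyRange n (n + k) 1).foldl
      (fun sums x => PySem.List.pyGetD arr x 0 + sums) 0) = fun _ : Int => (0 : Int) := by
    funext i
    rw [PySem.List.pyRange_one_eq_nil (by omega : i + k ≤ i)]
    rfl
  rw [hAdef, hBnone, hmap0,
      PySem.List.pyRange_one_cons (by omega : (0:Int) < (arr.length : Int) - k + 1),
      List.map_cons, List.foldl_cons,
      show pvAstep (none, none) 0 = (some 0, some 31) from rfl,
      pv_zero_fold]
  simp
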